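-- pv_equiv track=rewrite | github.com/sigmanauts/moltergo | src/moltbook/autonomy/runner.py | _is_near_best_hour
-- ===== SOURCE A (Python) =====
-- from typing import Any, Dict, List, Optional, Set, Tuple
--
-- def _is_near_best_hour(current_hour: int, best_hours: List[int], radius_hours: int = 1) -> bool:
--     if not best_hours:
--         return False
--     now = int(current_hour) % 24
--     radius = max(0, int(radius_hours))
--     for hour in best_hours:
--         distance = min((now - hour) % 24, (hour - now) % 24)
--         if distance <= radius:
--             return True
--     return False
-- ===== SOURCE B (Python) =====
-- def _is_near_best_hour(current_hour, best_hours, radius_hours=1):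
--     if not best_hours:
--         return False
--     now = int(current_hour) % 24
--     r = min(12, max(0, int(radius_hours)))
--     covered = set()
--     for h in best_hours:
--         for d in range(-r, r + 1):
--             covered.add((h + d) % 24)
--     return now in covered
-- ===== Notes on version B (the rewrite author's own statement) =====
-- stated objective: alternative
-- what changed: B replaces A's per-hour circular-distance scan with building a set of all covered hours ((h+d)%24 for d in [-r,r], radius capped at 12 since that already covers the whole 24-hour ring) and testing membership of the current hour.
import Mathlib
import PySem

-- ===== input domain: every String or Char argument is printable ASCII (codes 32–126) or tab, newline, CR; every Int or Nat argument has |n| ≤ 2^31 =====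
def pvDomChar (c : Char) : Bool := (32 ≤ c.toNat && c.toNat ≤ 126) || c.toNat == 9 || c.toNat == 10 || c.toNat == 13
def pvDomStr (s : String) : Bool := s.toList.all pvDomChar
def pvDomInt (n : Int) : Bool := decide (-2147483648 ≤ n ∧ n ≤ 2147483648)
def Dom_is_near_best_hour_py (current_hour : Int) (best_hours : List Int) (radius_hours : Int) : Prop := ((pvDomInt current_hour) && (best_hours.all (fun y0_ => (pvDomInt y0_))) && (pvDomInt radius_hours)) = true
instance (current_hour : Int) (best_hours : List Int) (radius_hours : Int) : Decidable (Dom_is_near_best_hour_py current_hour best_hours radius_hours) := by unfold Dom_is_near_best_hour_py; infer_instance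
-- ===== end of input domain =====

-- ===== PORT A =====
-- B builds the set of covered hours and tests membership instead of scanning circular distances (alternative).
def aLoop (now radius : Int) : List Int → Bool
  | [] => false
  | h :: rest =>
    if min (PySem.Int.mod (now - h) 24) (PySem.Int.mod (h - now) 24) ≤ radius then true
    else aLoop now radius rest

def is_near_best_hour_py (current_hour : Int) (best_hours : List Int) (radius_hours : Int) : Bool :=
  if best_hours.isEmpty then false
  else aLoop (PySem.Int.mod current_hour 24) (max 0 radius_hours) best_hours

-- ===== PORT B =====
def bCover (r h : Int) (s : PySem.Set Int) : PySem.Set Int :=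
  (PySem.List.pyRange (-r) (r + 1) 1).foldl (fun s d => PySem.Set.add s (PySem.Int.mod (h + d) 24)) s

def is_near_best_hour_py_alt (current_hour : Int) (best_hours : List Int) (radius_hours : Int) : Bool :=
  if best_hours.isEmpty then false
  else
    let now := PySem.Int.mod current_hour 24
    let r := min 12 (max 0 radius_hours)
    let covered := best_hours.foldl (fun s h => bCover r h s) PySem.Set.empty
    PySem.Set.contains covered now

-- ===== PRECONDITION & SPEC =====
def Spec_is_near_best_hour_py (current_hour : Int) (best_hours : List Int) (radius_hours : Int) (out : Bool) : Prop := out = is_near_best_hour_py_alt current_hour best_hours radius_hours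
instance (current_hour : Int) (best_hours : List Int) (radius_hours : Int) (out : Bool) : Decidable (Spec_is_near_best_hour_py current_hour best_hours radius_hours out) := by unfold Spec_is_near_best_hour_py; infer_instance

-- ===== CLAIM (what is proved, stated in full; the proofs are below) =====
def Claim_equal_is_near_best_hour_py : Prop := ∀ (current_hour : Int) (best_hours : List Int) (radius_hours : Int), Dom_is_near_best_hour_py current_hour best_hours radius_hours → Spec_is_near_best_hour_py current_hour best_hours radius_hours (is_near_best_hour_py current_hour best_hours radius_hours)

-- ===== LEMMAS AND PROOFS =====

-- now ∈ bCover r h s ↔ now ∈ s or some offset d within [-r,r] lands on now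
theorem mem_bCover (r h now : Int) (s : PySem.Set Int) :
    now ∈ bCover r h s ↔ now ∈ s ∨ ∃ d, -r ≤ d ∧ d < r + 1 ∧ PySem.Int.mod (h + d) 24 = now := by
  unfold bCover
  rw [← PySem.Set.update_map_eq_foldl_add]
  simp [PySem.Set.mem_update, PySem.List.mem_pyRange_one, List.mem_map]
  constructor
  · rintro (hs | ⟨d, ⟨h1, h2⟩, h3⟩)
    · exact Or.inl hs
    · exact Or.inr ⟨d, h1, h2, h3⟩
  · rintro (hs | ⟨d, h1, h2, h3⟩)
    · exact Or.inl hs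
    · exact Or.inr ⟨d, ⟨h1, h2⟩, h3⟩

theorem mem_foldl_bCover (r now : Int) (l : List Int) (s : PySem.Set Int) :
    now ∈ l.foldl (fun s h => bCover r h s) s ↔
      now ∈ s ∨ ∃ h ∈ l, ∃ d, -r ≤ d ∧ d < r + 1 ∧ PySem.Int.mod (h + d) 24 = now := by
  induction l generalizing s with
  | nil => simp
  | cons h t ih =>
    simp only [List.foldl_cons, ih, mem_bCover, List.mem_cons]
    constructor
    · rintro (((hs | hd) | ⟨h', hm, hd⟩))
      · exact Or.inl hs
      · exact Or.inr ⟨h, Or.inl rfl, hd⟩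
      · exact Or.inr ⟨h', Or.inr hm, hd⟩
    · rintro (hs | ⟨h', (rfl | hm), hd⟩)
      · exact Or.inl (Or.inl hs)
      · exact Or.inl (Or.inr hd)
      · exact Or.inr ⟨h', hm, hd⟩

theorem aLoop_eq_exists (now radius : Int) (l : List Int) :
    aLoop now radius l = true ↔
      ∃ h ∈ l, min (PySem.Int.mod (now - h) 24) (PySem.Int.mod (h - now) 24) ≤ radius := by
  induction l with
  | nil => simp [aLoop]
  | cons h t ih =>
    simp only [aLoop]
    split_ifs with hc
    · exact iff_of_true rfl ⟨h, by simp, hc⟩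
    · simp only [ih, List.mem_cons]
      constructor
      · rintro ⟨h', hm, hd⟩; exact ⟨h', Or.inr hm, hd⟩
      · rintro ⟨h', (rfl | hm), hd⟩
        · exact absurd hd hc
        · exact ⟨h', hm, hd⟩

-- circular distance ≤ max 0 R  ↔  some offset within the (capped) radius lands on now
theorem key_iff (now h R : Int) (h0 : 0 ≤ now) (h1 : now < 24) (hR : 0 ≤ R) :
    (min ((now - h) % 24) ((h - now) % 24) ≤ R ↔
      ∃ d, -(min 12 R) ≤ d ∧ d < min 12 R + 1 ∧ (h + d) % 24 = now) := by
  constructor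
  · intro hle
    rcases le_total ((now - h) % 24) ((h - now) % 24) with hc | hc
    · exact ⟨(now - h) % 24, by omega, by omega, by omega⟩
    · exact ⟨-((h - now) % 24), by omega, by omega, by omega⟩
  · rintro ⟨d, hd1, hd2, hd3⟩
    omega

-- ===== VERDICT (by name: the statement is the Claim_ definition above) =====
theorem is_near_best_hour_py_spec : Claim_equal_is_near_best_hour_py := by
  intro current_hour best_hours radius_hours _
  unfold Spec_is_near_best_hour_py is_near_best_hour_py is_near_best_hour_py_alt
  cases best_hours with
  | nil => simp
  | cons h t =>
    simp only [List.isEmpty_cons, if_neg Bool.false_ne_true]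
    rw [Bool.eq_iff_iff, PySem.Set.contains_iff, mem_foldl_bCover, aLoop_eq_exists]
    simp only [PySem.Int.mod_eq_emod_of_pos (by norm_num : (0:Int) < 24)]
    have h0 : 0 ≤ current_hour % 24 := by omega
    have h1 : current_hour % 24 < 24 := by omega
    have hR : 0 ≤ max 0 radius_hours := le_max_left _ _
    simp only [PySem.Set.empty, List.not_mem_nil, false_or]
    constructor
    · rintro ⟨h', hm, hd⟩
      obtain ⟨d, hd1, hd2, hd3⟩ := (key_iff _ h' (max 0 radius_hours) h0 h1 hR).mp hd
      exact ⟨h', hm, d, by omega, by omega, hd3⟩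
    · rintro ⟨h', hm, d, hd1, hd2, hd3⟩
      exact ⟨h', hm, (key_iff _ h' (max 0 radius_hours) h0 h1 hR).mpr ⟨d, by omega, by omega, hd3⟩⟩
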